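-- pv_equiv track=rewrite | github.com/varun-potluri/Cryptography | Major.py | LCMofArray
-- ===== SOURCE A (Python) =====
-- import math
-- import math
--
-- def LCMofArray(a):
--     temp = []
--     lcm = a[0]
--     temp.append(lcm)
--     for i in range(1, len(a)):
--         value = a[i] // math.gcd(lcm, a[i])
--         lcm = lcm * a[i] // math.gcd(lcm, a[i])
--         if value not in temp and value != 1:
--             temp.append(value)
--     return temp
-- ===== SOURCE B (Python) =====
-- import math
--
-- def LCMofArray(a):
--     # prefix-LCM table in one pass, then a separate value/dedup pass
--     L = [a[0]]
--     for x in a[1:]: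
--         L.append(L[-1] * x // math.gcd(L[-1], x))
--     temp = [a[0]]
--     for prev, x in zip(L, a[1:]):
--         v = x // math.gcd(prev, x)
--         if v != 1 and v not in temp:
--             temp.append(v)
--     return temp
-- ===== Notes on version B (the rewrite author's own statement) =====
-- stated objective: alternative
-- what changed: A's single loop carrying a running lcm is split into a first pass building a prefix-LCM table and a second zip pass that derives and dedups the values from the table.
import Mathlib
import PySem

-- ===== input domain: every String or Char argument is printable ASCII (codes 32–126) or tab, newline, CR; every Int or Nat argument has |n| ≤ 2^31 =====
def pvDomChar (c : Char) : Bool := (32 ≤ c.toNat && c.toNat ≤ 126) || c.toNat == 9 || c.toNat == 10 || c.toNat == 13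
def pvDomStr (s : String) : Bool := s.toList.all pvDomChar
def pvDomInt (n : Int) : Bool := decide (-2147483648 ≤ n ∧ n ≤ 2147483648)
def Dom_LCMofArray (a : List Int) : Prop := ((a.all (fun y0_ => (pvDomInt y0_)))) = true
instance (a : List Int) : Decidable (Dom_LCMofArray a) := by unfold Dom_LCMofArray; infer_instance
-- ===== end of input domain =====

-- B separates A's single loop into a prefix-LCM table build plus a zip pass for the
-- value/dedup step (objective: alternative decomposition, same cost).

-- ===== PORT A =====
-- A's loop: state (lcm, temp), one element at a time.
def LCMofArrayLoopA : List Int → Int → List Int → List Int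
  | [], _, temp => temp
  | x :: rest, lcm, temp =>
    let g : Int := Int.gcd lcm x
    let value := PySem.Int.floordiv x g
    let lcm' := PySem.Int.floordiv (lcm * x) g
    let temp' := if !(temp.contains value) && value != 1 then temp ++ [value] else temp
    LCMofArrayLoopA rest lcm' temp'

def LCMofArray (a : List Int) : List Int :=
  match a with
  | [] => []        -- unreachable under Pre_ (Python raises IndexError on [])
  | x :: rest => LCMofArrayLoopA rest x [x]

-- ===== PORT B =====
-- first pass: prefix LCMs of the tail, seeded with a[0]
def prefixLCM : List Int → Int → List Int
  | [], _ => []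
  | x :: rest, acc =>
    let acc' := PySem.Int.floordiv (acc * x) (Int.gcd acc x)
    acc' :: prefixLCM rest acc'

-- second pass: fold over zip of the table with the tail
def LCMofArray_alt (a : List Int) : List Int :=
  match a with
  | [] => []        -- unreachable under Pre_
  | x :: rest =>
    let L := x :: prefixLCM rest x
    (L.zip rest).foldl
      (fun temp p =>
        let v := PySem.Int.floordiv p.2 (Int.gcd p.1 p.2)
        if v != 1 && !(temp.contains v) then temp ++ [v] else temp)
      [x]

-- ===== PRECONDITION & SPEC =====
-- Pre_ excludes exactly the inputs where Python A raises: the empty list (IndexError on a[0])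
-- and lists with two or more zeros (gcd(0,0)=0 makes '//' raise ZeroDivisionError).
def Pre_LCMofArray (a : List Int) : Prop := a ≠ [] ∧ a.count 0 ≤ 1
instance (a : List Int) : Decidable (Pre_LCMofArray a) := by unfold Pre_LCMofArray; infer_instance
def pvWitness_LCMofArray : List Int := [4, 6, 9]

def Spec_LCMofArray (a : List Int) (out : List Int) : Prop := out = LCMofArray_alt a
instance (a : List Int) (out : List Int) : Decidable (Spec_LCMofArray a out) := by unfold Spec_LCMofArray; infer_instance

-- ===== CLAIM (what is proved, stated in full; the proofs are below) =====
def Claim_equal_LCMofArray : Prop := ∀ (a : List Int), Dom_LCMofArray a → Pre_LCMofArray a → Spec_LCMofArray a (LCMofArray a)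

-- ===== LEMMAS AND PROOFS =====

-- A's loop from state (lcm, temp) equals B's fold over the zip of the prefix-LCM
-- table seeded with lcm.  The two append conditions are the same Bool (∧ commutes).
theorem loopA_eq_fold (rest : List Int) : ∀ (lcm : Int) (temp : List Int),
    LCMofArrayLoopA rest lcm temp =
      ((lcm :: prefixLCM rest lcm).zip rest).foldl
        (fun temp p =>
          let v := PySem.Int.floordiv p.2 (Int.gcd p.1 p.2)
          if v != 1 && !(temp.contains v) then temp ++ [v] else temp)
        temp := by
  induction rest with
  | nil => intro lcm temp; simp [LCMofArrayLoopA]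
  | cons x rs ih =>
    intro lcm temp
    simp only [LCMofArrayLoopA, prefixLCM, List.zip_cons_cons, List.foldl_cons]
    rw [ih]
    congr 1
    simp only [Bool.and_comm]

-- ===== VERDICT (by name: the statement is the Claim_ definition above) =====

theorem LCMofArray_spec : Claim_equal_LCMofArray := by
  intro a _ hpre
  unfold Spec_LCMofArray LCMofArray LCMofArray_alt
  match a with
  | [] => exact absurd rfl hpre.1
  | x :: rest => exact loopA_eq_fold rest x [x]
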